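-- pv_equiv track=rewrite | github.com/anupyadav27/lab | rule-generator-engine/scripts/structured_aws_matrix_generator_v2.py | map_assertions_to_domain_subcat
-- ===== SOURCE A (Python) =====
-- from typing import Any, Dict, List, Set, Tuple, Optional
--
-- def map_assertions_to_domain_subcat(assertions: Dict[str, Any]) -> Dict[Tuple[str, str], List[Dict[str, Any]]]:
--     """Map assertions to domain+subcat using assertion_id tails"""
--     mapping = {}
--
--     for assertion in assertions.get("assertions", []):
--         assertion_id = assertion.get("assertion_id", "")
--         if "." in assertion_id:
--             # Extract domain.subcat from assertion_id
--             parts = assertion_id.split(".")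
--             if len(parts) >= 2:
--                 domain_key = parts[0]
--                 subcat_id = parts[1]
--                 key = (domain_key, subcat_id)
--                 mapping.setdefault(key, []).append(assertion)
--
--     return mapping
-- ===== SOURCE B (Python) =====
-- def map_assertions_to_domain_subcat(assertions):
--     """Map assertions to domain+subcat using assertion_id tails.
--
--     Two-pass scheme: first collect the distinct (domain, subcat) keys in
--     first-occurrence order, then build each group by filtering the
--     assertion list once per key.
--     """
--     items = assertions.get("assertions", [])
--
--     def key_of(assertion):
--         assertion_id = assertion.get("assertion_id", "")
--         if "." in assertion_id:
--             parts = assertion_id.split(".")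
--             if len(parts) >= 2:
--                 return (parts[0], parts[1])
--         return None
--
--     keys = []
--     for assertion in items:
--         k = key_of(assertion)
--         if k is not None and k not in keys:
--             keys.append(k)
--
--     return {k: [a for a in items if key_of(a) == k] for k in keys}
-- ===== Notes on version B (the rewrite author's own statement) =====
-- stated objective: alternative
-- what changed: Replaces A's single-pass dict/setdefault accumulation by a two-pass scheme: first collect the distinct (domain, subcat) keys in first-occurrence order, then build each group by filtering the assertion list once per key.
import Mathlib
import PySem

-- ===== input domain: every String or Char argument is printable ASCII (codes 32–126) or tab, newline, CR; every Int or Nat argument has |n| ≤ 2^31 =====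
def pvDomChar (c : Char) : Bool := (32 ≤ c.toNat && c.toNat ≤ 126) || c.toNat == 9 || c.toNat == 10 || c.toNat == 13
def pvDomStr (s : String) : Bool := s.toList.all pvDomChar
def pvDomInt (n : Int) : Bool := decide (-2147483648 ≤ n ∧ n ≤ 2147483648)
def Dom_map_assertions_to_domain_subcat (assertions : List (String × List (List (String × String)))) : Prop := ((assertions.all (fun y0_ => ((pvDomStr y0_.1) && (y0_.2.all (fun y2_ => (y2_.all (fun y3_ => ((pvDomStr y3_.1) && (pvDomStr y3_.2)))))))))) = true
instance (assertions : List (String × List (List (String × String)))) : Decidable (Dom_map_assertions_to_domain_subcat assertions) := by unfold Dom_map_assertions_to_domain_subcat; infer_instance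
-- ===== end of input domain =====

-- B replaces A's one-pass dict/setdefault grouping by a two-pass scheme (distinct keys in
-- first-occurrence order, then one filter per key): an alternative decomposition, not faster.


-- ===== PORT A =====
-- the dict keyed by (domain, subcat) is returned flattened to (domain, subcat, group) triples,
-- as the required signature demands
def map_assertions_to_domain_subcat (assertions : List (String × List (List (String × String)))) : List (String × String × List (List (String × String))) :=
  let mapping := ((PySem.Dict.mk assertions).getD "assertions" []).foldl
    (fun mapping assertion =>
      let assertion_id := (PySem.Dict.mk assertion).getD "assertion_id" ""
      if PySem.Str.isIn "." assertion_id then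
        let parts := (PySem.Str.split? assertion_id ".").getD []  -- sep "." is nonempty, split? is always some
        if 2 ≤ parts.length then
          let key := (PySem.List.pyGetD parts 0 "", PySem.List.pyGetD parts 1 "")
          mapping.modify key [] (· ++ [assertion])
        else mapping
      else mapping)
    PySem.Dict.empty
  mapping.items.map (fun p => (p.1.1, p.1.2, p.2))

-- ===== PORT B =====
-- Source B's helper key_of: some k = the (domain, subcat) key, none = no key (entry skipped)
def pvKeyOf (assertion : List (String × String)) : Option (String × String) :=
  let assertion_id := (PySem.Dict.mk assertion).getD "assertion_id" ""
  if PySem.Str.isIn "." assertion_id then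
    let parts := (PySem.Str.split? assertion_id ".").getD []  -- sep "." is nonempty, split? is always some
    if 2 ≤ parts.length then
      some (PySem.List.pyGetD parts 0 "", PySem.List.pyGetD parts 1 "")
    else none
  else none

def map_assertions_to_domain_subcat_alt (assertions : List (String × List (List (String × String)))) : List (String × String × List (List (String × String))) :=
  let items := (PySem.Dict.mk assertions).getD "assertions" []
  let keys := items.foldl
    (fun ks a =>
      match pvKeyOf a with
      | some k => PySem.Set.add ks k
      | none => ks) []
  keys.map (fun k => (k.1, k.2, items.filter (fun a => pvKeyOf a == some k)))

-- ===== PRECONDITION & SPEC =====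
def Spec_map_assertions_to_domain_subcat (assertions : List (String × List (List (String × String)))) (out : List (String × String × List (List (String × String)))) : Prop := out = map_assertions_to_domain_subcat_alt assertions
instance (assertions : List (String × List (List (String × String)))) (out : List (String × String × List (List (String × String)))) : Decidable (Spec_map_assertions_to_domain_subcat assertions out) := by unfold Spec_map_assertions_to_domain_subcat; infer_instance

-- ===== CLAIM (what is proved, stated in full; the proofs are below) =====
def Claim_equal_map_assertions_to_domain_subcat : Prop := ∀ (assertions : List (String × List (List (String × String)))), Dom_map_assertions_to_domain_subcat assertions → Spec_map_assertions_to_domain_subcat assertions (map_assertions_to_domain_subcat assertions)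

-- ===== LEMMAS AND PROOFS =====

-- the (key, assertion) pairs A's loop actually acts on
def pvPairs (items : List (List (String × String))) : List ((String × String) × List (String × String)) :=
  items.filterMap (fun a => (pvKeyOf a).map (fun k => (k, a)))

-- A's loop body is a match on pvKeyOf
lemma pv_foldA_eq (items : List (List (String × String)))
    (init : PySem.Dict (String × String) (List (List (String × String)))) :
    items.foldl
      (fun mapping assertion =>
        let assertion_id := (PySem.Dict.mk assertion).getD "assertion_id" ""
        if PySem.Str.isIn "." assertion_id then
          let parts := (PySem.Str.split? assertion_id ".").getD []  -- sep "." is nonempty, split? is always some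
          if 2 ≤ parts.length then
            let key := (PySem.List.pyGetD parts 0 "", PySem.List.pyGetD parts 1 "")
            mapping.modify key [] (· ++ [assertion])
          else mapping
        else mapping) init
    = (pvPairs items).foldl (fun d p => d.modify p.1 [] (· ++ [p.2])) init := by
  induction items generalizing init with
  | nil => rfl
  | cons a rest ih =>
    simp only [List.foldl_cons, pvPairs, List.filterMap_cons]
    by_cases h1 : PySem.Str.isIn "." ((PySem.Dict.mk a).getD "assertion_id" "") = true
    · by_cases h2 : 2 ≤ ((PySem.Str.split? ((PySem.Dict.mk a).getD "assertion_id" "") ".").getD []).length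
      · simp only [h1, if_true, h2, pvKeyOf, Option.map_some, List.foldl_cons]
        exact ih _
      · simp only [h1, if_true, h2, pvKeyOf]
        exact ih _
    · simp only [h1, pvKeyOf]
      exact ih _

-- B's key loop is Set.add over the pair keys
lemma pv_foldB_eq (items : List (List (String × String))) (s : List (String × String)) :
    items.foldl
      (fun ks a =>
        match pvKeyOf a with
        | some k => PySem.Set.add ks k
        | none => ks) s
    = ((pvPairs items).map Prod.fst).foldl PySem.Set.add s := by
  induction items generalizing s with
  | nil => rfl
  | cons a rest ih =>
    simp only [List.foldl_cons, pvPairs, List.filterMap_cons]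
    cases h : pvKeyOf a with
    | none => simp only [Option.map_none]; exact ih _
    | some k => simp only [Option.map_some, List.map_cons, List.foldl_cons]; exact ih _

-- B's per-key filter in terms of the pair list
lemma pv_filter_eq (items : List (List (String × String))) (k : String × String) :
    items.filter (fun a => pvKeyOf a == some k)
    = ((pvPairs items).filter (fun p => p.1 == k)).map (·.2) := by
  induction items with
  | nil => rfl
  | cons a rest ih =>
    simp only [List.filter_cons, pvPairs, List.filterMap_cons]
    cases h : pvKeyOf a with
    | none => simpa [h] using ih
    | some k' =>
      by_cases hk : k' = k
      · subst hk; simpa [h] using ih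
      · simp only [Option.map_some, List.filter_cons]
        simpa [hk] using ih

-- ===== VERDICT (by name: the statement is the Claim_ definition above) =====
theorem map_assertions_to_domain_subcat_spec : Claim_equal_map_assertions_to_domain_subcat := by
  intro assertions _
  unfold Spec_map_assertions_to_domain_subcat
  unfold map_assertions_to_domain_subcat map_assertions_to_domain_subcat_alt
  dsimp only
  set items := (PySem.Dict.mk assertions).getD "assertions" [] with hitems
  rw [pv_foldA_eq, pv_foldB_eq]
  set pairs := pvPairs items with hpairs
  have hnodup : ((pairs.foldl (fun d p => d.modify p.1 [] (· ++ [p.2])) PySem.Dict.empty).keys).Nodup := by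
    exact PySem.Dict.nodup_keys_foldl_modify_key pairs Prod.fst [] (fun _ p => (· ++ [p.2])) _ PySem.Dict.nodup_keys_empty
  rw [PySem.Dict.items_eq_map_keys _ hnodup []]
  have hkeys : (pairs.foldl (fun d p => d.modify p.1 [] (· ++ [p.2])) PySem.Dict.empty).keys
      = (pairs.map Prod.fst).foldl PySem.Set.add [] := by
    rw [PySem.Dict.keys_foldl_modify_key pairs Prod.fst [] (fun _ p => (· ++ [p.2]))]
    simp only [PySem.Dict.keys_empty]
    rw [PySem.Set.update, ← PySem.Set.ofList_eq_foldl]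
  rw [hkeys, List.map_map]
  apply List.map_congr_left
  intro k _
  simp only [Function.comp_apply]
  rw [PySem.Dict.getD_foldl_modify_append, PySem.Dict.getD_empty, List.nil_append, pv_filter_eq]
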